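-- pv_equiv track=rewrite | github.com/rammi-dev/data-k8s-playground | components/de/iceberg/upload/generate_merge_sql.py | group_mappings
-- ===== SOURCE A (Python) =====
-- from collections import defaultdict
--
-- COL_SOURCE_TAB = "Tabela zrodlowa"
--
-- COL_DEST_TAB = "Tabela docelowa"
--
-- COL_ZRODLO = "ZRODLO"
--
-- def group_mappings(rows):
--     """Group rows by (destination_table, source_table).
--
--     Returns dict: dest_table -> list of (source_table, [mapping_rows])
--     """
--     pair_map = defaultdict(list)
--     for row in rows:
--         if row.get(COL_ZRODLO, "").strip().upper() != "RAW":
--             continue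
--         dest = row[COL_DEST_TAB].strip()
--         src = row[COL_SOURCE_TAB].strip()
--         pair_map[(dest, src)].append(row)
--
--     dest_map = defaultdict(list)
--     for (dest, src), mapping_rows in pair_map.items():
--         dest_map[dest].append((src, mapping_rows))
--
--     return dest_map
-- ===== SOURCE B (Python) =====
-- from collections import defaultdict
--
-- COL_SOURCE_TAB = "Tabela zrodlowa"
-- COL_DEST_TAB = "Tabela docelowa"
-- COL_ZRODLO = "ZRODLO"
--
--
-- def group_mappings(rows):
--     """Group rows by (destination_table, source_table).
--
--     No grouping dict: keep the RAW rows as (dest, src, row) triples, then for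
--     each first-appearance-distinct dest collect, per first-appearance-distinct
--     src, the matching rows by plain list scans.
--     """
--     kept = [(r[COL_DEST_TAB].strip(), r[COL_SOURCE_TAB].strip(), r)
--             for r in rows
--             if r.get(COL_ZRODLO, "").strip().upper() == "RAW"]
--     out = defaultdict(list)
--     for d in dict.fromkeys(t[0] for t in kept):
--         rows_d = [t for t in kept if t[0] == d]
--         out[d] = [(s, [t[2] for t in rows_d if t[1] == s])
--                   for s in dict.fromkeys(t[1] for t in rows_d)]
--     return out
-- ===== Notes on version B (the rewrite author's own statement) =====
-- stated objective: alternative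
-- what changed: A incrementally builds a (dest,src)-keyed grouping dict and regroups it by dest in a second dict pass; B builds no grouping dict at all: it keeps the RAW rows as (dest,src,row) triples, deduplicates destinations and per-destination sources with dict.fromkeys, and collects each group by list-comprehension scans over the kept triples.
import Mathlib
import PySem

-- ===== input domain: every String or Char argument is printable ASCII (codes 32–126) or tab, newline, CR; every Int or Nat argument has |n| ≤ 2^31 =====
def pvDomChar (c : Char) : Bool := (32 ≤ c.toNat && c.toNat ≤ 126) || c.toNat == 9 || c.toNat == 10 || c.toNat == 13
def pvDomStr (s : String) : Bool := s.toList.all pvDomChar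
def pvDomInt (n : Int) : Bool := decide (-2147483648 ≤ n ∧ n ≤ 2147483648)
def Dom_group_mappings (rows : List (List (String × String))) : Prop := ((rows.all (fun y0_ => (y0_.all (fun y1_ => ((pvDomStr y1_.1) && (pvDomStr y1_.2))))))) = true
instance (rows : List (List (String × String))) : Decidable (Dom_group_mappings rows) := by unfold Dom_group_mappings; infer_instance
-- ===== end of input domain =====

-- B replaces A's incremental (dest,src)-keyed grouping dict + regrouping pass by dedup-and-scan:
-- a kept list of (dest,src,row) triples, distinct keys via dict.fromkeys, groups by list scans
-- (objective: alternative).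

-- rows are Python dicts, encoded as association lists (lookup = first match).
def pvRowGet (row : List (String × String)) (k : String) : Option String :=
  (row.find? (fun p => p.1 == k)).map (·.2)

-- row.get("ZRODLO", "").strip().upper() == "RAW"
def pvIsRaw (row : List (String × String)) : Bool :=
  PySem.Str.upper (PySem.Str.strip ((pvRowGet row "ZRODLO").getD "")) == "RAW"

-- ===== PORT A =====
-- first loop of A: build pair_map; `none` = Python KeyError on row[...]
def pvPairLoop : List (List (String × String)) →
    PySem.Dict (String × String) (List (List (String × String))) →
    Option (PySem.Dict (String × String) (List (List (String × String))))
  | [], pm => some pm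
  | row :: rs, pm =>
    if pvIsRaw row then
      match pvRowGet row "Tabela docelowa", pvRowGet row "Tabela zrodlowa" with
      | some dv, some sv =>
          pvPairLoop rs (pm.modify (PySem.Str.strip dv, PySem.Str.strip sv) [] (fun a => a ++ [row]))
      | _, _ => none
    else pvPairLoop rs pm

def group_mappings (rows : List (List (String × String))) :
    List (String × List (String × (List (List (String × String))))) :=
  match pvPairLoop rows PySem.Dict.empty with
  | none => []   -- unreachable under Pre_ (Python raises KeyError there)
  | some pm =>
      (pm.items.foldl
        (fun dm p => dm.modify p.1.1 [] (fun a => a ++ [(p.1.2, p.2)]))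
        PySem.Dict.empty).items

-- ===== PORT B =====
-- B's kept-list comprehension: (dest, src, row) triples of the RAW rows; `none` = KeyError
def pvKept : List (List (String × String)) →
    Option (List (String × String × List (String × String)))
  | [] => some []
  | row :: rs =>
    if pvIsRaw row then
      match pvRowGet row "Tabela docelowa", pvRowGet row "Tabela zrodlowa" with
      | some dv, some sv =>
          (pvKept rs).map (fun ks => (PySem.Str.strip dv, PySem.Str.strip sv, row) :: ks)
      | _, _ => none
    else pvKept rs

def group_mappings_alt (rows : List (List (String × String))) :
    List (String × List (String × (List (List (String × String))))) :=
  match pvKept rows with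
  | none => []   -- unreachable under Pre_ (Python raises KeyError there)
  | some kept =>
      (PySem.Set.ofList (kept.map (·.1))).map (fun d =>
        let rows_d := kept.filter (fun t => t.1 == d)
        (d, (PySem.Set.ofList (rows_d.map (fun t => t.2.1))).map (fun s =>
          (s, (rows_d.filter (fun t => t.2.1 == s)).map (fun t => t.2.2)))))

-- ===== PRECONDITION & SPEC =====
-- Pre_ excludes exactly the inputs on which Python A raises KeyError: a RAW row lacking
-- the "Tabela docelowa" or "Tabela zrodlowa" key (B raises KeyError there too).
def Pre_group_mappings (rows : List (List (String × String))) : Prop :=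
  ∀ row ∈ rows, pvIsRaw row = true →
    (pvRowGet row "Tabela docelowa").isSome ∧ (pvRowGet row "Tabela zrodlowa").isSome
instance (rows : List (List (String × String))) : Decidable (Pre_group_mappings rows) := by
  unfold Pre_group_mappings; infer_instance

def pvWitness_group_mappings : (List (List (String × String))) :=
  [[("ZRODLO", "RAW"), ("Tabela docelowa", "D"), ("Tabela zrodlowa", "S")],
   [("ZRODLO", "other")]]

-- stepwise DecidableEq for the (deeply nested) output type: instance search alone
-- does not reach this depth, so we build it in two explicit steps.
def pvDecEqInner : DecidableEq (List (String × List (List (String × String)))) := inferInstance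
def pvDecEqOut : DecidableEq (List (String × List (String × (List (List (String × String)))))) :=
  letI := pvDecEqInner; inferInstance

def Spec_group_mappings (rows : List (List (String × String))) (out : List (String × List (String × (List (List (String × String)))))) : Prop := out = group_mappings_alt rows
instance (rows : List (List (String × String))) (out : List (String × List (String × (List (List (String × String)))))) : Decidable (Spec_group_mappings rows out) := by
  unfold Spec_group_mappings; exact pvDecEqOut out (group_mappings_alt rows)

-- ===== CLAIM (what is proved, stated in full; the proofs are below) =====
def Claim_equal_group_mappings : Prop := ∀ (rows : List (List (String × String))), Dom_group_mappings rows → Pre_group_mappings rows → Spec_group_mappings rows (group_mappings rows)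

-- ===== LEMMAS AND PROOFS =====

-- dest / src of a row as total functions (equal to A's/B's values wherever the keys exist)
def pvDest (row : List (String × String)) : String :=
  PySem.Str.strip ((pvRowGet row "Tabela docelowa").getD "")
def pvSrc (row : List (String × String)) : String :=
  PySem.Str.strip ((pvRowGet row "Tabela zrodlowa").getD "")

def pvTrip (row : List (String × String)) : String × String × List (String × String) :=
  (pvDest row, pvSrc row, row)

lemma pvPairLoop_eq (rs : List (List (String × String)))
    (pm : PySem.Dict (String × String) (List (List (String × String))))
    (h : ∀ row ∈ rs, pvIsRaw row = true →
      (pvRowGet row "Tabela docelowa").isSome ∧ (pvRowGet row "Tabela zrodlowa").isSome) :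
    pvPairLoop rs pm = some ((rs.filter pvIsRaw).foldl
      (fun pm row => pm.modify (pvDest row, pvSrc row) [] (fun a => a ++ [row])) pm) := by
  induction rs generalizing pm with
  | nil => rfl
  | cons row rs ih =>
    by_cases hr : pvIsRaw row = true
    · obtain ⟨h1, h2⟩ := h row (by simp) hr
      obtain ⟨dv, hdv⟩ := Option.isSome_iff_exists.mp h1
      obtain ⟨sv, hsv⟩ := Option.isSome_iff_exists.mp h2
      have hd : pvDest row = PySem.Str.strip dv := by simp [pvDest, hdv]
      have hs : pvSrc row = PySem.Str.strip sv := by simp [pvSrc, hsv]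
      simp only [pvPairLoop, hr, if_true, hdv, hsv, List.filter_cons_of_pos hr, List.foldl_cons]
      rw [ih _ (fun r hr' hraw => h r (by simp [hr']) hraw), hd, hs]
    · simp only [pvPairLoop, hr, if_false, Bool.false_eq_true,
        List.filter_cons_of_neg (by simpa using hr)]
      exact ih _ (fun r hr' hraw => h r (by simp [hr']) hraw)

lemma pvKept_eq (rs : List (List (String × String)))
    (h : ∀ row ∈ rs, pvIsRaw row = true →
      (pvRowGet row "Tabela docelowa").isSome ∧ (pvRowGet row "Tabela zrodlowa").isSome) :
    pvKept rs = some ((rs.filter pvIsRaw).map pvTrip) := by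
  induction rs with
  | nil => rfl
  | cons row rs ih =>
    by_cases hr : pvIsRaw row = true
    · obtain ⟨h1, h2⟩ := h row (by simp) hr
      obtain ⟨dv, hdv⟩ := Option.isSome_iff_exists.mp h1
      obtain ⟨sv, hsv⟩ := Option.isSome_iff_exists.mp h2
      have hd : pvDest row = PySem.Str.strip dv := by simp [pvDest, hdv]
      have hs : pvSrc row = PySem.Str.strip sv := by simp [pvSrc, hsv]
      simp only [pvKept, hr, if_true, hdv, hsv, List.filter_cons_of_pos hr, List.map_cons]
      rw [ih (fun r hr' hraw => h r (by simp [hr']) hraw)]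
      simp [pvTrip, hd, hs]
    · simp only [pvKept, hr, if_false, Bool.false_eq_true,
        List.filter_cons_of_neg (by simpa using hr)]
      exact ih (fun r hr' hraw => h r (by simp [hr']) hraw)

-- a grouping fold `d[key x] = f x (d.get(key x, d0))` read back at one key c
lemma pvGetD_foldl_modify_filter {κ ν β : Type} [BEq κ] [LawfulBEq κ] [DecidableEq κ]
    (l : List β) (key : β → κ) (d0 : ν) (f : β → ν → ν) (c : κ) (dm : PySem.Dict κ ν) :
    (l.foldl (fun dm x => dm.modify (key x) d0 (f x)) dm).getD c d0
      = (l.filter (fun x => key x == c)).foldl (fun v x => f x v) (dm.getD c d0) := by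
  induction l generalizing dm with
  | nil => rfl
  | cons x xs ih =>
    rw [List.foldl_cons, ih, List.filter_cons]
    by_cases hx : key x = c
    · simp [hx]
    · rw [PySem.Dict.getD_modify, if_neg (fun hc => hx hc.symm)]
      simp [hx]

-- dedup commutes with filter
lemma pvSet_ofList_filter {α : Type} [BEq α] [LawfulBEq α] (p : α → Bool) (xs : List α) :
    (PySem.Set.ofList xs).filter p = PySem.Set.ofList (xs.filter p) := by
  induction xs using List.reverseRecOn with
  | nil => rfl
  | append_singleton ys x ih =>
    rw [PySem.Set.ofList_append_singleton, List.filter_append]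
    by_cases hp : p x = true
    · by_cases hx : x ∈ PySem.Set.ofList ys
      · have hmem : x ∈ PySem.Set.ofList (ys.filter p) := by
          rw [PySem.Set.mem_ofList]
          exact List.mem_filter.mpr ⟨(PySem.Set.mem_ofList _ _).mp hx, hp⟩
        simp [PySem.Set.add_of_mem hx, hp, ih, PySem.Set.ofList_append_singleton,
          PySem.Set.add_of_mem hmem]
      · have hnm : x ∉ PySem.Set.ofList (ys.filter p) := by
          rw [PySem.Set.mem_ofList]
          exact fun hmem => hx (by rw [PySem.Set.mem_ofList]; exact (List.mem_filter.mp hmem).1)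
        simp [PySem.Set.add_of_not_mem hx, hp, ih, List.filter_append,
          PySem.Set.ofList_append_singleton, PySem.Set.add_of_not_mem hnm]
    · by_cases hx : x ∈ PySem.Set.ofList ys
      · simp [PySem.Set.add_of_mem hx, hp, ih]
      · simp [PySem.Set.add_of_not_mem hx, hp, ih, List.filter_append]

-- dedup-map-dedup collapses to map-dedup
lemma pvSet_ofList_map_ofList {α β : Type} [BEq α] [BEq β] [LawfulBEq α] [LawfulBEq β]
    (f : α → β) (xs : List α) :
    PySem.Set.ofList ((PySem.Set.ofList xs).map f) = PySem.Set.ofList (xs.map f) := by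
  induction xs using List.reverseRecOn with
  | nil => rfl
  | append_singleton ys x ih =>
    rw [PySem.Set.ofList_append_singleton, List.map_append, List.map_singleton,
      PySem.Set.ofList_append_singleton, ← ih]
    by_cases hx : x ∈ PySem.Set.ofList ys
    · have hfx : f x ∈ PySem.Set.ofList ((PySem.Set.ofList ys).map f) := by
        rw [PySem.Set.mem_ofList]; exact List.mem_map_of_mem hx
      rw [PySem.Set.add_of_mem hx, PySem.Set.add_of_mem hfx]
    · rw [PySem.Set.add_of_not_mem hx, List.map_append, List.map_singleton,
        PySem.Set.ofList_append_singleton]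

-- dedup commutes with an injective map
lemma pvSet_ofList_map_inj {α β : Type} [BEq α] [BEq β] [LawfulBEq α] [LawfulBEq β]
    (f : α → β) (hf : Function.Injective f) (xs : List α) :
    PySem.Set.ofList (xs.map f) = (PySem.Set.ofList xs).map f := by
  induction xs using List.reverseRecOn with
  | nil => rfl
  | append_singleton ys x ih =>
    rw [List.map_append, List.map_singleton, PySem.Set.ofList_append_singleton, ih,
      PySem.Set.ofList_append_singleton]
    by_cases hx : x ∈ PySem.Set.ofList ys
    · rw [PySem.Set.add_of_mem hx, PySem.Set.add_of_mem (List.mem_map_of_mem hx)]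
    · have hfx : f x ∉ (PySem.Set.ofList ys).map f := by
        intro hmem
        obtain ⟨y, hy, hxy⟩ := List.mem_map.mp hmem
        exact hx (hf hxy ▸ hy)
      rw [PySem.Set.add_of_not_mem hx, PySem.Set.add_of_not_mem hfx, List.map_append,
        List.map_singleton]

-- the canonical value both programs compute
def pvCanon (l : List (List (String × String))) :
    List (String × List (String × (List (List (String × String))))) :=
  (PySem.Set.ofList (l.map pvDest)).map (fun d =>
    (d, (PySem.Set.ofList ((l.filter (fun r => pvDest r == d)).map pvSrc)).map (fun s =>
      (s, (l.filter (fun r => pvDest r == d)).filter (fun r => pvSrc r == s)))))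

-- ---- the flat pair_map of A, fully described ----
lemma pvPair_keys (l : List (List (String × String))) :
    ((l.foldl (fun pm row => pm.modify (pvDest row, pvSrc row) [] (fun a => a ++ [row]))
      PySem.Dict.empty)).keys = PySem.Set.ofList (l.map (fun r => (pvDest r, pvSrc r))) := by
  have h := PySem.Dict.keys_foldl_modify_key l
    (fun r => ((pvDest r, pvSrc r) : String × String))
    ([] : List (List (String × String))) (fun _ r => fun a => a ++ [r]) PySem.Dict.empty
  simpa [PySem.Dict.keys_empty, PySem.Set.update_nil_left] using h

lemma pvPair_nodup (l : List (List (String × String))) :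
    ((l.foldl (fun pm row => pm.modify (pvDest row, pvSrc row) [] (fun a => a ++ [row]))
      PySem.Dict.empty)).keys.Nodup :=
  PySem.Dict.nodup_keys_foldl_modify_key l
    (fun r => ((pvDest r, pvSrc r) : String × String))
    ([] : List (List (String × String))) (fun _ r => fun a => a ++ [r]) PySem.Dict.empty
    PySem.Dict.nodup_keys_empty

lemma pvPair_getD (l : List (List (String × String))) (k : String × String) :
    ((l.foldl (fun pm row => pm.modify (pvDest row, pvSrc row) [] (fun a => a ++ [row]))
      PySem.Dict.empty)).getD k []
      = l.filter (fun r => (pvDest r, pvSrc r) == k) := by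
  have h := pvGetD_foldl_modify_filter l
    (fun r => ((pvDest r, pvSrc r) : String × String))
    ([] : List (List (String × String))) (fun r => fun a => a ++ [r]) k PySem.Dict.empty
  simpa only [PySem.Dict.getD_empty, PySem.List.foldl_append_singleton, List.nil_append] using h

lemma pvPair_items (l : List (List (String × String))) :
    ((l.foldl (fun pm row => pm.modify (pvDest row, pvSrc row) [] (fun a => a ++ [row]))
      PySem.Dict.empty)).items
      = (PySem.Set.ofList (l.map (fun r => (pvDest r, pvSrc r)))).map
          (fun k => (k, l.filter (fun r => (pvDest r, pvSrc r) == k))) := by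
  rw [PySem.Dict.items_eq_map_keys _ (pvPair_nodup l) [], pvPair_keys]
  exact List.map_congr_left (fun k _ => by rw [pvPair_getD])

-- ---- A's regrouping loop over an arbitrary items list, fully described ----
lemma pvRe_nodup (m : List ((String × String) × List (List (String × String)))) :
    ((m.foldl (fun dm p => dm.modify p.1.1 [] (fun a => a ++ [(p.1.2, p.2)]))
      PySem.Dict.empty)).keys.Nodup :=
  PySem.Dict.nodup_keys_foldl_modify_key m (fun p => p.1.1)
    ([] : List (String × List (List (String × String))))
    (fun _ p => fun a => a ++ [(p.1.2, p.2)]) PySem.Dict.empty PySem.Dict.nodup_keys_empty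

lemma pvRe_keys (m : List ((String × String) × List (List (String × String)))) :
    ((m.foldl (fun dm p => dm.modify p.1.1 [] (fun a => a ++ [(p.1.2, p.2)]))
      PySem.Dict.empty)).keys = PySem.Set.ofList (m.map (fun p => p.1.1)) := by
  have h := PySem.Dict.keys_foldl_modify_key m (fun p => p.1.1)
    ([] : List (String × List (List (String × String))))
    (fun _ p => fun a => a ++ [(p.1.2, p.2)]) PySem.Dict.empty
  simpa [PySem.Dict.keys_empty, PySem.Set.update_nil_left] using h

lemma pvRe_getD (m : List ((String × String) × List (List (String × String)))) (d : String) :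
    ((m.foldl (fun dm p => dm.modify p.1.1 [] (fun a => a ++ [(p.1.2, p.2)]))
      PySem.Dict.empty)).getD d []
      = (m.filter (fun p => p.1.1 == d)).map (fun p => (p.1.2, p.2)) := by
  have h := pvGetD_foldl_modify_filter m (fun p => p.1.1)
    ([] : List (String × List (List (String × String))))
    (fun p => fun a => a ++ [(p.1.2, p.2)]) d PySem.Dict.empty
  simpa only [PySem.Dict.getD_empty, PySem.List.foldl_append_singleton_eq_map, List.nil_append] using h

lemma pvRe_items (m : List ((String × String) × List (List (String × String)))) :
    ((m.foldl (fun dm p => dm.modify p.1.1 [] (fun a => a ++ [(p.1.2, p.2)]))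
      PySem.Dict.empty)).items
      = (PySem.Set.ofList (m.map (fun p => p.1.1))).map
          (fun d => (d, (m.filter (fun p => p.1.1 == d)).map (fun p => (p.1.2, p.2)))) := by
  rw [PySem.Dict.items_eq_map_keys _ (pvRe_nodup m) [], pvRe_keys]
  exact List.map_congr_left (fun d _ => by rw [pvRe_getD])

-- ---- splitting a filter by the (dest, src) pair ----
lemma pvFilter_pair (l : List (List (String × String))) (d s : String) :
    l.filter (fun r => (pvDest r, pvSrc r) == (d, s))
      = (l.filter (fun r => pvDest r == d)).filter (fun r => pvSrc r == s) := by
  rw [List.filter_filter]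
  refine List.filter_congr (fun r _ => ?_)
  show (pvDest r == d && pvSrc r == s) = (pvSrc r == s && pvDest r == d)
  exact Bool.and_comm _ _

lemma pvA_canon (l : List (List (String × String))) :
    ((l.foldl (fun pm row => pm.modify (pvDest row, pvSrc row) [] (fun a => a ++ [row]))
        PySem.Dict.empty).items.foldl
      (fun dm p => dm.modify p.1.1 [] (fun a => a ++ [(p.1.2, p.2)]))
      PySem.Dict.empty).items = pvCanon l := by
  rw [pvPair_items l, pvRe_items]
  unfold pvCanon
  have hkeys : PySem.Set.ofList
      (((PySem.Set.ofList (l.map (fun r => (pvDest r, pvSrc r)))).map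
        (fun k => (k, l.filter (fun r => (pvDest r, pvSrc r) == k)))).map (fun p => p.1.1))
      = PySem.Set.ofList (l.map pvDest) := by
    rw [List.map_map]
    have h1 : ((fun p : (String × String) × List (List (String × String)) => p.1.1) ∘
        (fun k => (k, l.filter (fun r => (pvDest r, pvSrc r) == k)))) = (fun k => k.1) := rfl
    rw [h1, pvSet_ofList_map_ofList, List.map_map]
    rfl
  rw [hkeys]
  refine List.map_congr_left (fun d _ => ?_)
  have hfilt : (((PySem.Set.ofList (l.map (fun r => (pvDest r, pvSrc r)))).map
        (fun k => (k, l.filter (fun r => (pvDest r, pvSrc r) == k)))).filter (fun p => p.1.1 == d))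
      = ((PySem.Set.ofList ((l.filter (fun r => pvDest r == d)).map pvSrc)).map (fun s => (d, s))).map
          (fun k => (k, l.filter (fun r => (pvDest r, pvSrc r) == k))) := by
    rw [List.filter_map]
    congr 1
    have h2 : ((fun p : (String × String) × List (List (String × String)) => p.1.1 == d) ∘
        (fun k => (k, l.filter (fun r => (pvDest r, pvSrc r) == k)))) = (fun k => k.1 == d) := rfl
    rw [h2, pvSet_ofList_filter, List.filter_map]
    have h3 : ((fun k : String × String => k.1 == d) ∘ (fun r => (pvDest r, pvSrc r)))
        = (fun r => pvDest r == d) := rfl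
    rw [h3]
    have h4 : (l.filter (fun r => pvDest r == d)).map (fun r => (pvDest r, pvSrc r))
        = ((l.filter (fun r => pvDest r == d)).map pvSrc).map (fun s => (d, s)) := by
      rw [List.map_map]
      refine List.map_congr_left (fun r hr => ?_)
      have : pvDest r = d := by
        have := List.of_mem_filter hr
        exact eq_of_beq this
      simp [this]
    rw [h4, pvSet_ofList_map_inj (fun s => (d, s)) (fun a b h => by simpa using h)]
  rw [hfilt, List.map_map, List.map_map]
  refine congrArg (Prod.mk d) (List.map_congr_left (fun s _ => ?_))
  show ((d, s).2, l.filter (fun r => (pvDest r, pvSrc r) == (d, s)))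
      = (s, (l.filter (fun r => pvDest r == d)).filter (fun r => pvSrc r == s))
  rw [pvFilter_pair]

-- ---- B's dedup-and-scan pipeline over the kept triples equals the same canonical value ----
lemma pvB_canon (l : List (List (String × String))) :
    ((PySem.Set.ofList ((l.map pvTrip).map (·.1))).map (fun d =>
      let rows_d := (l.map pvTrip).filter (fun t => t.1 == d)
      (d, (PySem.Set.ofList (rows_d.map (fun t => t.2.1))).map (fun s =>
        (s, (rows_d.filter (fun t => t.2.1 == s)).map (fun t => t.2.2)))))) = pvCanon l := by
  unfold pvCanon
  have hk : (l.map pvTrip).map (·.1) = l.map pvDest := by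
    rw [List.map_map]; rfl
  rw [hk]
  refine List.map_congr_left (fun d _ => ?_)
  have hrd : (l.map pvTrip).filter (fun t => t.1 == d)
      = (l.filter (fun r => pvDest r == d)).map pvTrip := by
    rw [List.filter_map]; rfl
  simp only [hrd]
  have hs : ((l.filter (fun r => pvDest r == d)).map pvTrip).map (fun t => t.2.1)
      = (l.filter (fun r => pvDest r == d)).map pvSrc := by
    rw [List.map_map]; rfl
  rw [hs]
  refine congrArg (Prod.mk d) (List.map_congr_left (fun s _ => ?_))
  have hf : (((l.filter (fun r => pvDest r == d)).map pvTrip).filter (fun t => t.2.1 == s))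
      = ((l.filter (fun r => pvDest r == d)).filter (fun r => pvSrc r == s)).map pvTrip := by
    rw [List.filter_map]; rfl
  rw [hf, List.map_map]
  refine congrArg (Prod.mk s) ?_
  have : ((fun t : String × String × List (String × String) => t.2.2) ∘ pvTrip) = id := rfl
  rw [this, List.map_id]

-- ===== VERDICT (by name: the statement is the Claim_ definition above) =====
theorem group_mappings_spec : Claim_equal_group_mappings := by
  intro rows _hDom hPre
  show group_mappings rows = group_mappings_alt rows
  unfold group_mappings group_mappings_alt
  rw [pvPairLoop_eq rows PySem.Dict.empty hPre, pvKept_eq rows hPre]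
  show ((((rows.filter pvIsRaw).foldl (fun pm row => pm.modify (pvDest row, pvSrc row) []
      (fun a => a ++ [row])) PySem.Dict.empty)).items.foldl
      (fun dm p => dm.modify p.1.1 [] (fun a => a ++ [(p.1.2, p.2)])) PySem.Dict.empty).items
    = ((PySem.Set.ofList (((rows.filter pvIsRaw).map pvTrip).map (·.1))).map (fun d =>
        let rows_d := ((rows.filter pvIsRaw).map pvTrip).filter (fun t => t.1 == d)
        (d, (PySem.Set.ofList (rows_d.map (fun t => t.2.1))).map (fun s =>
          (s, (rows_d.filter (fun t => t.2.1 == s)).map (fun t => t.2.2))))))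
  rw [pvA_canon (rows.filter pvIsRaw), pvB_canon (rows.filter pvIsRaw)]
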